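-- pv_equiv track=rewrite | github.com/ivi982010/SySdL-TPs | Lexer.py | a_re6
-- ===== SOURCE A (Python) =====
-- def a_re6 (tokens, acu):
--     s = 0
--     for c in acu:
--         if s == 0 and c == 'w':
--             s = 1
--         elif s == 1 and c == 'h':
--             s = 2
--         elif s == 2 and c == 'i':
--             s = 3
--         elif s == 3 and c == 'l':
--             s = 4
--         elif s == 4 and c == 'e':
--             s = 5
--         else:
--             s = -1
--             break
--     if s == 5:
--         tokens.append(("<Reservada>", acu))
--     return (s == 5)
-- ===== SOURCE B (Python) =====
-- def a_re6(tokens, acu):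
--     matched = (acu == 'while')
--     if matched:
--         tokens.append(("<Reservada>", acu))
--     return matched
-- ===== Notes on version B (the rewrite author's own statement) =====
-- stated objective: simpler
-- what changed: Replaced the hand-stepped 5-state DFA with a break over the accumulator by a single closed-form string equality acu == 'while'.
import Mathlib
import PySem

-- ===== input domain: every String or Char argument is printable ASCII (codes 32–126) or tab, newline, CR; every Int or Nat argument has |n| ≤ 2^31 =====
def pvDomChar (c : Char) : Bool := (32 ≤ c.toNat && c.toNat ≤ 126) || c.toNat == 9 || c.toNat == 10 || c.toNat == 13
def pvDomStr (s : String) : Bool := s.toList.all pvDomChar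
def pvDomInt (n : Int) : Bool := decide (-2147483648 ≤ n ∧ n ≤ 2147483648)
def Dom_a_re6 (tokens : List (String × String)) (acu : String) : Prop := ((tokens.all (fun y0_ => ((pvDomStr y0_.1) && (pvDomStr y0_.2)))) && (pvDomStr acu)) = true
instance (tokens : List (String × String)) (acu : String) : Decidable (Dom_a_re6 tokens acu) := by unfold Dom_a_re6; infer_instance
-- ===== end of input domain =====

-- B replaces A's character-stepped DFA with one closed-form equality acu == "while" (simpler);
-- A and B perform the identical tokens.append mutation; the theorems are about the returned Bool only.
-- ===== PORT A =====
-- DFA loop of A: state s stepped per character; else branch sets -1 and breaks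
def a_re6_loop : Int → List Char → Int
  | s, [] => s
  | s, c :: cs =>
    if s = 0 ∧ c = 'w' then a_re6_loop 1 cs
    else if s = 1 ∧ c = 'h' then a_re6_loop 2 cs
    else if s = 2 ∧ c = 'i' then a_re6_loop 3 cs
    else if s = 3 ∧ c = 'l' then a_re6_loop 4 cs
    else if s = 4 ∧ c = 'e' then a_re6_loop 5 cs
    else (-1)

-- `tokens.append` mutates the Python list; only the returned Bool is modelled here
def a_re6 (tokens : List (String × String)) (acu : String) : Bool :=
  a_re6_loop 0 acu.toList == 5

-- ===== PORT B =====
-- B: matched = (acu == 'while'); the append is the same mutation, return matched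
def a_re6_alt (tokens : List (String × String)) (acu : String) : Bool :=
  acu == "while"

-- ===== PRECONDITION & SPEC =====
def Spec_a_re6 (tokens : List (String × String)) (acu : String) (out : Bool) : Prop := out = a_re6_alt tokens acu
instance (tokens : List (String × String)) (acu : String) (out : Bool) : Decidable (Spec_a_re6 tokens acu out) := by unfold Spec_a_re6; infer_instance

-- ===== CLAIM (what is proved, stated in full; the proofs are below) =====
def Claim_equal_a_re6 : Prop := ∀ (tokens : List (String × String)) (acu : String), Dom_a_re6 tokens acu → Spec_a_re6 tokens acu (a_re6 tokens acu)

-- ===== LEMMAS AND PROOFS =====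

-- ===== VERDICT (by name: the statement is the Claim_ definition above) =====
theorem a_re6_loop_eq_five (cs : List Char) :
    (a_re6_loop 0 cs = 5) ↔ cs = ['w','h','i','l','e'] := by
  match cs with
  | [] => simp [a_re6_loop]; try (split_ifs <;> simp_all <;> try omega)
  | [c0] => simp [a_re6_loop]; try (split_ifs <;> simp_all <;> try omega)
  | [c0,c1] => simp [a_re6_loop]; try (split_ifs <;> simp_all <;> try omega)
  | [c0,c1,c2] => simp [a_re6_loop]; try (split_ifs <;> simp_all <;> try omega)
  | [c0,c1,c2,c3] => simp [a_re6_loop]; try (split_ifs <;> simp_all <;> try omega)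
  | [c0,c1,c2,c3,c4] => simp [a_re6_loop]; try (split_ifs <;> simp_all <;> try omega)
  | c0::c1::c2::c3::c4::c5::cs => simp [a_re6_loop]; try (split_ifs <;> simp_all <;> try omega)

theorem a_re6_spec : Claim_equal_a_re6 := by
  intro tokens acu _
  unfold Spec_a_re6 a_re6 a_re6_alt
  rw [Bool.eq_iff_iff]
  simp only [beq_iff_eq, a_re6_loop_eq_five]
  constructor
  · intro h; exact String.toList_injective (by simpa using h)
  · intro h; simp [h]
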